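-- pv_equiv track=rewrite | github.com/skvcool-rgb/KOS-Organism | kos/dsl_engine.py | _tile_from_unit
-- ===== SOURCE A (Python) =====
-- def _tile_from_unit(unit, target_h, target_w):
--     """Tile a small unit grid to fill target dimensions."""
--     if not unit:
--         return unit
--     uh, uw = len(unit), len(unit[0])
--     result = []
--     for i in range(target_h):
--         row = []
--         for j in range(target_w):
--             row.append(unit[i % uh][j % uw])
--         result.append(row)
--     return result
-- ===== SOURCE B (Python) =====
-- def _tile_from_unit(unit, target_h, target_w):
--     """Tile a small unit grid to fill target dimensions.
--
--     Replication version: build each base row once by list multiplication and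
--     slicing (row[:uw] * ceil(w/uw), cut to w), then replicate the whole block
--     of rows vertically and cut to h; no per-cell modular indexing at all.
--     """
--     if not unit:
--         return unit
--     uh, uw = len(unit), len(unit[0])
--     h, w = max(target_h, 0), max(target_w, 0)
--     if h == 0:
--         return []
--     if uw == 0 or w == 0:
--         base = [[] for _ in unit]
--     else:
--         reps = (w + uw - 1) // uw
--         base = [(row[:uw] * reps)[:w] for row in unit]
--     vreps = (h + uh - 1) // uh
--     return [row[:] for row in (base * vreps)[:h]]
-- ===== Notes on version B (the rewrite author's own statement) =====
-- stated objective: alternative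
-- what changed: B builds each base row once by list multiplication plus slicing (row[:uw]*ceil(w/uw) cut to w) and then replicates the whole block of rows vertically and cuts to h, replacing A's per-cell double loop with modular indexing by whole-list replication and slicing.
import Mathlib
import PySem

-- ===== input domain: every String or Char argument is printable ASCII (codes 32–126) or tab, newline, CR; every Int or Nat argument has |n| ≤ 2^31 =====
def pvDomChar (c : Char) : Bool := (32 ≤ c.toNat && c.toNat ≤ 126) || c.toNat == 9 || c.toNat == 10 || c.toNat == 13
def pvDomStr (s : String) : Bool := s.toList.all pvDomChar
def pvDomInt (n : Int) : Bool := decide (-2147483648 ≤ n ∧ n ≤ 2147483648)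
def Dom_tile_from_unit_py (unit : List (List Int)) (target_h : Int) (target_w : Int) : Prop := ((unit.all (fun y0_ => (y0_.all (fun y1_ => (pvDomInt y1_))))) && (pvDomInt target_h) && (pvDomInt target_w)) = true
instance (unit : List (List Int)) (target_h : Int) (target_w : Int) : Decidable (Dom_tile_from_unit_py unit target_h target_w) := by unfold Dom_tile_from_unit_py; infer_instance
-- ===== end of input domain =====

-- B tiles by whole-list replication and slicing (row[:uw] * ceil(w/uw) cut to w, then the row
-- block * ceil(h/uh) cut to h) instead of A's per-cell double loop with modular indexing.

-- ===== PORT A =====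
def tile_from_unit_py (unit : List (List Int)) (target_h : Int) (target_w : Int) : List (List Int) :=
  if unit = [] then unit
  else
    let uh : Int := unit.length
    let uw : Int := (PySem.List.pyGetD unit 0 []).length
    (PySem.List.pyRange 0 target_h 1).foldl (fun result i =>
      result ++ [(PySem.List.pyRange 0 target_w 1).foldl (fun row j =>
        row ++ [PySem.List.pyGetD (PySem.List.pyGetD unit (PySem.Int.mod i uh) []) (PySem.Int.mod j uw) 0]) []]) []

-- ===== PORT B =====
def tile_from_unit_py_alt (unit : List (List Int)) (target_h : Int) (target_w : Int) : List (List Int) :=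
  if unit = [] then unit
  else
    let uh : Int := unit.length
    let uw : Int := (PySem.List.pyGetD unit 0 []).length
    let h := max target_h 0
    let w := max target_w 0
    if h = 0 then [] else
    let base : List (List Int) :=
      if uw = 0 ∨ w = 0 then unit.map (fun _ => ([] : List Int))
      else
        let reps := PySem.Int.floordiv (w + uw - 1) uw
        unit.map (fun row =>
          PySem.List.slice (PySem.List.pyRepeat (PySem.List.slice row none (some uw)) reps) none (some w))
    let vreps := PySem.Int.floordiv (h + uh - 1) uh
    -- final [row[:] for row in …]: the copy row[:] is the identity on values
    (PySem.List.slice (PySem.List.pyRepeat base vreps) none (some h)).map (fun row => row)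

-- ===== PRECONDITION & SPEC =====
-- Pre_ excludes exactly the inputs where Python A raises: unit nonempty with an empty first row but
-- target_w > 0 (ZeroDivisionError on j % 0), or a touched row shorter than the touched column range
-- (IndexError on ragged rows).
def Pre_tile_from_unit_py (unit : List (List Int)) (target_h : Int) (target_w : Int) : Prop :=
  unit = [] ∨ target_h ≤ 0 ∨
    ((0 < ((unit.headD []).length : Int) ∨ target_w ≤ 0) ∧
     ∀ row ∈ unit.take target_h.toNat, min target_w ((unit.headD []).length : Int) ≤ (row.length : Int))
instance (unit : List (List Int)) (target_h : Int) (target_w : Int) : Decidable (Pre_tile_from_unit_py unit target_h target_w) := by unfold Pre_tile_from_unit_py; infer_instance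

def pvWitness_tile_from_unit_py : List (List Int) × Int × Int := ([[1, 2], [3, 4]], 3, 5)

def Spec_tile_from_unit_py (unit : List (List Int)) (target_h : Int) (target_w : Int) (out : List (List Int)) : Prop := out = tile_from_unit_py_alt unit target_h target_w
instance (unit : List (List Int)) (target_h : Int) (target_w : Int) (out : List (List Int)) : Decidable (Spec_tile_from_unit_py unit target_h target_w out) := by unfold Spec_tile_from_unit_py; infer_instance

-- ===== CLAIM (what is proved, stated in full; the proofs are below) =====
def Claim_equal_tile_from_unit_py : Prop := ∀ (unit : List (List Int)) (target_h : Int) (target_w : Int), Dom_tile_from_unit_py unit target_h target_w → Pre_tile_from_unit_py unit target_h target_w → Spec_tile_from_unit_py unit target_h target_w (tile_from_unit_py unit target_h target_w)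

-- ===== LEMMAS AND PROOFS =====

-- ceiling division: a ≤ ceil(a/b) * b
theorem pv_le_ceil_mul (a b : Nat) (hb : 0 < b) : a ≤ ((a + b - 1) / b) * b := by
  have h1 := Nat.div_add_mod (a + b - 1) b
  have h2 := Nat.mod_lt (a + b - 1) hb
  have h3 : b * ((a + b - 1) / b) = ((a + b - 1) / b) * b := Nat.mul_comm _ _
  omega

-- indexing into a replicated-and-flattened list is modular indexing
theorem pv_getElem?_flatten_replicate {α : Type} (l : List α) (N k : Nat)
    (hk : k < N * l.length) :
    (List.flatten (List.replicate N l))[k]? = l[k % l.length]? := by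
  induction N generalizing k with
  | zero => omega
  | succ N ih =>
    have hk' : k < N * l.length + l.length := by rw [← Nat.succ_mul]; exact hk
    have hlen : 0 < l.length := by
      rcases Nat.eq_zero_or_pos l.length with h0 | h0
      · rw [h0, Nat.mul_zero] at hk'; omega
      · exact h0
    rw [List.replicate_succ, List.flatten_cons]
    by_cases h : k < l.length
    · rw [List.getElem?_append_left h, Nat.mod_eq_of_lt h]
    · rw [Nat.not_lt] at h
      rw [List.getElem?_append_right h, ih (k - l.length) (by omega),
        Nat.mod_eq_sub_mod h]

-- the first H elements of a replicated-and-flattened list, as a map over range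
theorem pv_take_flatten_replicate {α : Type} (l : List α) (N H : Nat) (d : α)
    (hH : H ≤ N * l.length) :
    List.take H (List.flatten (List.replicate N l))
      = (List.range H).map (fun k => l.getD (k % l.length) d) := by
  have hlen : (List.flatten (List.replicate N l)).length = N * l.length := by
    simp [List.length_flatten]
  apply List.ext_getElem?
  intro k
  by_cases hk : k < H
  · have hk' : k < N * l.length := lt_of_lt_of_le hk hH
    have hl : 0 < l.length := by
      rcases Nat.eq_zero_or_pos l.length with h0 | h0
      · rw [h0, Nat.mul_zero] at hk'; omega
      · exact h0
    rw [List.getElem?_take_of_lt hk, pv_getElem?_flatten_replicate l N k hk',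
      List.getElem?_map, List.getElem?_range hk,
      List.getElem?_eq_getElem (Nat.mod_lt k hl), Option.map_some,
      List.getD_eq_getElem l d (Nat.mod_lt k hl)]
  · have h1 : (List.take H (List.flatten (List.replicate N l))).length ≤ k := by
      rw [List.length_take, hlen]; omega
    have h2 : ((List.range H).map (fun k => l.getD (k % l.length) d)).length ≤ k := by
      simp; omega
    rw [List.getElem?_eq_none h1, List.getElem?_eq_none h2]

-- one tiled row built by replication+slicing equals A's per-cell modular row
theorem pv_row (row : List Int) (uw w : Nat) (hw : 0 < w) (huw : 0 < uw)
    (hlen : min w uw ≤ row.length) :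
    List.take w (List.flatten (List.replicate ((w + uw - 1) / uw) (List.take uw row)))
      = (List.range w).map (fun l => row.getD (l % uw) 0) := by
  by_cases hc : uw ≤ row.length
  · have ht : (List.take uw row).length = uw := by simp [Nat.min_eq_left hc]
    rw [pv_take_flatten_replicate _ _ _ 0 (by rw [ht]; exact pv_le_ceil_mul w uw huw)]
    apply List.map_congr_left
    intro l hl
    rw [List.mem_range] at hl
    have hmod : l % uw < uw := Nat.mod_lt l huw
    rw [ht, List.getD_eq_getElem _ 0 (by rw [ht]; exact hmod),
      List.getD_eq_getElem row 0 (lt_of_lt_of_le hmod hc)]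
    simp [List.getElem_take]
  · rw [Nat.not_le] at hc
    have hwle : w ≤ row.length := by omega
    have ht : List.take uw row = row := List.take_of_length_le (by omega)
    have hreps : 1 ≤ (w + uw - 1) / uw := by
      rw [Nat.one_le_div_iff huw]; omega
    rw [ht, pv_take_flatten_replicate _ _ _ 0
      (le_trans hwle (by calc row.length = 1 * row.length := (Nat.one_mul _).symm
                           _ ≤ ((w + uw - 1) / uw) * row.length := Nat.mul_le_mul_right _ hreps))]
    apply List.map_congr_left
    intro l hl
    rw [List.mem_range] at hl
    rw [Nat.mod_eq_of_lt (by omega), Nat.mod_eq_of_lt (by omega)]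

-- pyRepeat is definitionally replication + flatten
theorem pv_pyRepeat_eq {α : Type} (xs : List α) (n : Int) :
    PySem.List.pyRepeat xs n = List.flatten (List.replicate n.toNat xs) := by
  simp [PySem.List.pyRepeat]

-- unit[0] with Python indexing is headD on a list
theorem pv_pyGetD_zero {α : Type} (unit : List α) (d : α) :
    PySem.List.pyGetD unit 0 d = unit.headD d := by
  cases unit <;> simp [PySem.List.pyGetD, PySem.List.pyGet?, PySem.List.pyIdx?]

-- ===== VERDICT (by name: the statement is the Claim_ definition above) =====
theorem tile_from_unit_py_spec : Claim_equal_tile_from_unit_py := by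
  intro unit th tw _ hpre
  unfold Spec_tile_from_unit_py tile_from_unit_py tile_from_unit_py_alt
  by_cases hu : unit = []
  · simp [hu]
  rw [if_neg hu, if_neg hu]
  dsimp only
  have huh : 0 < unit.length := List.length_pos_iff.mpr hu
  -- A to canonical map-of-range form
  simp only [PySem.List.foldl_append_singleton_eq_map, List.nil_append,
    PySem.List.pyRange_one, Int.sub_zero, List.map_map, Function.comp_def, zero_add,
    PySem.Int.mod_natCast, PySem.List.pyGetD_natCast]
  by_cases hth0 : th ≤ 0
  · -- target_h ≤ 0: both sides are empty
    have hth := hth0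
    have hmax : max th 0 = 0 := by omega
    have h0 : th.toNat = 0 := by omega
    simp [hmax, h0]
  · -- target_h > 0: the precondition supplies its third disjunct
    have hth : 0 < th := by omega
    have hpre3 : (0 < ((unit.headD []).length : Int) ∨ tw ≤ 0) ∧
        ∀ row ∈ unit.take th.toNat, min tw ((unit.headD []).length : Int) ≤ (row.length : Int) := by
      rcases hpre with h | h | h
      · exact absurd h hu
      · omega
      · exact h
    obtain ⟨hdisj, hrag⟩ := hpre3
    have hmaxth : max th 0 = th := by omega
    rw [if_neg (by omega : ¬ max th 0 = 0)]
    have hthc : th + (unit.length : Int) - 1 = ((th.toNat + unit.length - 1 : Nat) : Int) := by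
      omega
    by_cases htw0 : tw ≤ 0
    · -- target_w ≤ 0: every row is empty on both sides
      have htw := htw0
      have hw0 : max tw 0 = 0 := by omega
      have hwn : tw.toNat = 0 := by omega
      rw [if_pos (Or.inr hw0), hmaxth, hthc, PySem.Int.floordiv_natCast, pv_pyRepeat_eq,
        Int.toNat_natCast, PySem.List.slice_to _ (le_of_lt hth),
        pv_take_flatten_replicate (unit.map fun _ => ([] : List Int)) _ th.toNat []
          (by rw [List.length_map]; exact pv_le_ceil_mul _ _ huh)]
      simp only [List.length_map]
      rw [List.map_id']
      apply List.map_congr_left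
      intro k hk
      have hik : k % unit.length < unit.length := Nat.mod_lt k huh
      simp [hwn, List.getD_eq_getElem?_getD, List.getElem?_eq_getElem hik]
    · -- target_w > 0 (main case): 0 < uw by the precondition
      have htw : 0 < tw := by omega
      have huw : 0 < (PySem.List.pyGetD unit 0 []).length := by
        rw [pv_pyGetD_zero]
        rcases hdisj with h | h
        · omega
        · omega
      have hif : ¬(((PySem.List.pyGetD unit 0 []).length : Int) = 0 ∨ max tw 0 = 0) := by
        intro h
        rcases h with h | h
        · omega
        · omega
      have hmaxtw : max tw 0 = tw := by omega
      have htwc : tw + ((PySem.List.pyGetD unit 0 []).length : Int) - 1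
          = ((tw.toNat + (PySem.List.pyGetD unit 0 []).length - 1 : Nat) : Int) := by
        omega
      rw [if_neg hif, hmaxth, hmaxtw, hthc, htwc]
      simp only [PySem.Int.floordiv_natCast, PySem.List.slice_to_natCast,
        PySem.List.slice_to _ (le_of_lt htw), PySem.List.slice_to _ (le_of_lt hth),
        pv_pyRepeat_eq, Int.toNat_natCast]
      rw [pv_take_flatten_replicate _ _ th.toNat []
          (by rw [List.length_map]; exact pv_le_ceil_mul _ _ huh)]
      simp only [List.length_map]
      rw [List.map_id']
      apply List.map_congr_left
      intro k hk
      rw [List.mem_range] at hk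
      have hik : k % unit.length < unit.length := Nat.mod_lt k huh
      have hmem : unit[k % unit.length]'hik ∈ unit.take th.toNat := by
        have hlt : k % unit.length < (unit.take th.toNat).length := by
          rw [List.length_take]
          have := Nat.mod_le k unit.length
          omega
        have := List.getElem_take (xs := unit) (j := th.toNat) (i := k % unit.length) (h := hlt)
        rw [← this]
        exact List.getElem_mem hlt
      have hlen : min tw.toNat (PySem.List.pyGetD unit 0 []).length
          ≤ (unit[k % unit.length]'hik).length := by
        have h1 := hrag _ hmem
        rw [pv_pyGetD_zero] at *
        omega
      rw [List.getD_eq_getElem unit [] hik, List.getD_eq_getElem _ [] (by rw [List.length_map]; exact hik),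
        List.getElem_map]
      exact (pv_row (unit[k % unit.length]'hik) _ tw.toNat (by omega) huw hlen).symm
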